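-- pv_equiv track=rewrite | github.com/Ritamdasgupta/Rabin_Karp_StringSearch | a4.py | new_horner
-- ===== SOURCE A (Python) =====
-- def wildcard(ch):
--     if ord(ch)<ord("A") or ord(ch)>ord("Z"):
--         return True
--     return False
--
-- def new_horner(st,x,q):
--     m=len(st)
--     if wildcard(st[0]):
--         po=0
--         result=0
--     else:
--         result = (ord(st[0])-ord("A"))
--     for i in range(1, m):
--         if not wildcard(st[i]):
--             result = result*x + (ord(st[i])-ord("A"))
--         else:
--             po=i
--             result=result*x
--     return (result%q , po)
-- ===== SOURCE B (Python) =====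
-- def new_horner(st, x, q):
--     # modular power-sum: result = sum(digit_i * x**(m-1-i) mod q) mod q, using 3-arg pow;
--     # po found by a separate last-wildcard scan
--     m = len(st)
--     result = 0
--     for i, c in enumerate(st):
--         if 'A' <= c <= 'Z':
--             result += (ord(c) - 65) * pow(x, m - 1 - i, q)
--     for i, c in enumerate(st):
--         if not ('A' <= c <= 'Z'):
--             po = i
--     return (result % q, po)
-- ===== Notes on version B (the rewrite author's own statement) =====
-- stated objective: alternative
-- what changed: Replaces A's single Horner accumulation loop (result = result*x + digit with po tracked inline) by a modular power-sum — result = sum(digit_i * pow(x, m-1-i, q)) % q using 3-arg pow — with the last wildcard position found by a separate scan.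
import Mathlib
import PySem

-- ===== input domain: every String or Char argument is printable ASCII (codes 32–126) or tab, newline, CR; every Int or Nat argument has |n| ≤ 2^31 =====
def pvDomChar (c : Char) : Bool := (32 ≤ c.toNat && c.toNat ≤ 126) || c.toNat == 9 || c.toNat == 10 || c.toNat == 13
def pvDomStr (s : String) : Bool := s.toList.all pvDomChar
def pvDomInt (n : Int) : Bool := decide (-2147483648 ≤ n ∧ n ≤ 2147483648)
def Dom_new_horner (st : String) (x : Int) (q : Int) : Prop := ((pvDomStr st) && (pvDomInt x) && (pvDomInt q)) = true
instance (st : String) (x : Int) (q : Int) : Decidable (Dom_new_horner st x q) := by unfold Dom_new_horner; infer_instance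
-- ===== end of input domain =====

-- B replaces A's single Horner loop by a direct power-sum plus a separate last-wildcard scan (alternative decomposition, same cost class).
-- Pre_ excludes the inputs on which Python A raises: empty string (IndexError), no wildcard (UnboundLocalError), q = 0 (ZeroDivisionError).

-- ===== PORT A =====
def pyWildcard (ch : Char) : Bool := (ch.toNat : Int) < 65 || (ch.toNat : Int) > 90

def new_horner (st : String) (x : Int) (q : Int) : Int × Int :=
  let l := st.toList
  let m : Int := (l.length : Int)
  -- init: A inspects st[0]; on the empty string Python raises IndexError (excluded by Pre_), the port returns a junk state there
  let init : Int × Option Int :=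
    match PySem.List.pyGet? l 0 with
    | none => (0, none)
    | some c => if pyWildcard c then (0, some 0) else (((c.toNat : Int) - 65), none)
  let s := (PySem.List.pyRange 1 m 1).foldl
    (fun (s : Int × Option Int) (i : Int) =>
      match PySem.List.pyGet? l i with
      | none => s
      | some c =>
        if !(pyWildcard c) then (s.1 * x + ((c.toNat : Int) - 65), s.2)
        else (s.1 * x, some i)) init
  -- Python raises UnboundLocalError when po was never assigned (excluded by Pre_): port returns junk 0 there
  (PySem.Int.mod s.1 q, s.2.getD 0)

-- ===== PORT B =====
def new_horner_alt (st : String) (x : Int) (q : Int) : Int × Int :=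
  let l := st.toList
  let m := l.length
  -- result += (ord(c)-65) * pow(x, m-1-i, q); the Python exponent m-1-i is ≥ 0 on every
  -- iteration (i < m), so the Nat subtraction m - 1 - i.toNat is exact
  let result : Int :=
    (PySem.List.enumerate l).foldl
      (fun r ic =>
        if 65 ≤ ic.2.toNat ∧ ic.2.toNat ≤ 90 then
          r + ((ic.2.toNat : Int) - 65) * PySem.Int.powMod x (m - 1 - ic.1.toNat) q
        else r) 0
  let po : Option Int :=
    (PySem.List.enumerate l).foldl
      (fun p ic => if 65 ≤ ic.2.toNat ∧ ic.2.toNat ≤ 90 then p else some ic.1) none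
  -- Python raises UnboundLocalError when po was never assigned (excluded by Pre_): port returns junk 0 there
  (PySem.Int.mod result q, po.getD 0)

-- ===== PRECONDITION & SPEC =====
-- Pre_: exactly where Python A returns normally: nonempty string, at least one wildcard character, q ≠ 0.
def Pre_new_horner (st : String) (_x : Int) (q : Int) : Prop :=
  st.toList ≠ [] ∧ (st.toList.any (fun c => c.toNat < 65 || 90 < c.toNat)) = true ∧ q ≠ 0
instance (st : String) (x : Int) (q : Int) : Decidable (Pre_new_horner st x q) := by
  unfold Pre_new_horner; infer_instance

def pvWitness_new_horner : String × Int × Int := ("AB?C", 31, 101)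

def Spec_new_horner (st : String) (x : Int) (q : Int) (out : Int × Int) : Prop := out = new_horner_alt st x q
instance (st : String) (x : Int) (q : Int) (out : Int × Int) : Decidable (Spec_new_horner st x q out) := by unfold Spec_new_horner; infer_instance

-- ===== CLAIM (what is proved, stated in full; the proofs are below) =====
def Claim_equal_new_horner : Prop := ∀ (st : String) (x : Int) (q : Int), Dom_new_horner st x q → Pre_new_horner st x q → Spec_new_horner st x q (new_horner st x q)

-- ===== LEMMAS AND PROOFS =====

-- digit value A/B assign to a character (0 for wildcards)
def pvDig (c : Char) : Int := if pyWildcard c then 0 else (c.toNat : Int) - 65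

-- reference value of A's accumulator after processing indices 0..n-1
def pvH (l : List Char) (x : Int) : Nat → Int
  | 0 => 0
  | n + 1 => pvH l x n * x + pvDig (l.getD n 'A')

-- reference value of po after processing indices 0..n-1
def pvP (l : List Char) : Nat → Option Int
  | 0 => none
  | n + 1 => if pyWildcard (l.getD n 'A') then some (n : Int) else pvP l n

lemma pv_enum_eq (l : List Char) (s : Int) :
    PySem.List.enumerate l s = (List.range l.length).map (fun (k : Nat) => (s + (k : Int), l.getD k 'A')) := by
  induction l generalizing s with
  | nil => simp [PySem.List.enumerate_nil]
  | cons a t ih =>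
    rw [PySem.List.enumerate_cons, ih, List.length_cons, List.range_succ_eq_map]
    simp only [List.map_cons, List.map_map, Nat.cast_zero, add_zero, List.getD_cons_zero]
    refine congrArg (List.cons _) ?_
    apply List.map_congr_left
    intro k _
    simp only [Function.comp_apply, Nat.succ_eq_add_one, List.getD_cons_succ]
    congr 1
    push_cast; ring

-- A's loop equals the reference pair (pvH, pvP)
lemma pv_loopA (l : List Char) (x : Int) (n : Nat) (h1 : 1 ≤ n) (h2 : n ≤ l.length) :
    (PySem.List.pyRange 1 (n : Int) 1).foldl
      (fun (s : Int × Option Int) (i : Int) =>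
        match PySem.List.pyGet? l i with
        | none => s
        | some c =>
          if !(pyWildcard c) then (s.1 * x + ((c.toNat : Int) - 65), s.2)
          else (s.1 * x, some i))
      (match PySem.List.pyGet? l 0 with
       | none => (0, none)
       | some c => if pyWildcard c then (0, some 0) else (((c.toNat : Int) - 65), none))
    = (pvH l x n, pvP l n) := by
  induction n with
  | zero => omega
  | succ n ih =>
    by_cases hn : n = 0
    · subst hn
      have h0 : 0 < l.length := by omega
      rw [show (((0 : Nat) + 1 : Nat) : Int) = 1 by norm_num, PySem.List.pyRange_one_eq_nil (by norm_num)]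
      have hg : PySem.List.pyGet? l 0 = some l[0] := by
        rw [PySem.List.pyGet?_zero, List.getElem?_eq_getElem h0]
      have hd : l.getD 0 'A' = l[0] := List.getD_eq_getElem l 'A' h0
      simp only [List.foldl_nil, hg, pvH, pvP, hd]
      by_cases hw : pyWildcard l[0] <;> simp [hw, pvDig]
    · have h1' : 1 ≤ n := by omega
      have h2' : n ≤ l.length := by omega
      have hr : PySem.List.pyRange 1 ((n + 1 : Nat) : Int) 1
          = PySem.List.pyRange 1 (n : Int) 1 ++ [(n : Int)] := by
        push_cast
        exact PySem.List.pyRange_one_succ_right (by exact_mod_cast h1')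
      rw [hr, List.foldl_append, ih h1' h2']
      have hlt : n < l.length := by omega
      have hg : PySem.List.pyGet? l (n : Int) = some l[n] := by
        rw [PySem.List.pyGet?_natCast, List.getElem?_eq_getElem hlt]
      have hd : l.getD n 'A' = l[n] := List.getD_eq_getElem l 'A' hlt
      simp only [List.foldl_cons, List.foldl_nil, hg, pvH, pvP, hd]
      by_cases hw : pyWildcard l[n] <;> simp [hw, pvDig]

-- pvH as the power sum over range
lemma pv_H_eq_sum (l : List Char) (x : Int) (n : Nat) :
    pvH l x n = ((List.range n).map (fun k => pvDig (l.getD k 'A') * x ^ (n - 1 - k))).sum := by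
  induction n with
  | zero => simp [pvH]
  | succ n ih =>
    rw [List.range_succ, List.map_append, List.sum_append, pvH, ih, ← List.sum_map_mul_right]
    have h1 : List.map (fun k => pvDig (l.getD k 'A') * x ^ (n - 1 - k) * x) (List.range n)
        = List.map (fun k => pvDig (l.getD k 'A') * x ^ (n + 1 - 1 - k)) (List.range n) := by
      apply List.map_congr_left; intro k hk
      have hk' : k < n := List.mem_range.mp hk
      rw [mul_assoc, ← pow_succ]
      congr 2
      omega
    rw [h1]
    simp

-- B's po fold over range equals pvP
lemma pv_poB (l : List Char) (n : Nat) :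
    (List.range n).foldl
      (fun (p : Option Int) (k : Nat) => if pyWildcard (l.getD k 'A') then some (k : Int) else p) none
    = pvP l n := by
  induction n with
  | zero => simp [pvP]
  | succ n ih => rw [List.range_succ, List.foldl_append, ih]; simp [pvP]

-- PySem.Int.mod y q is congruent to y modulo q
lemma pv_mod_sub_self (y q : Int) : q ∣ (PySem.Int.mod y q - y) := by
  have h := PySem.Int.floordiv_mul_add_mod y q
  exact ⟨-(PySem.Int.floordiv y q), by linarith⟩

-- congruent arguments have the same Python mod
lemma pv_mod_congr (a b q : Int) (h : q ∣ a - b) : PySem.Int.mod a q = PySem.Int.mod b q := by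
  rcases eq_or_ne q 0 with hq | hq
  · subst hq
    have hab : a = b := by simpa [sub_eq_zero] using h
    rw [hab]
  · have hdvd : q ∣ (PySem.Int.mod a q - PySem.Int.mod b q) := by
      have da := pv_mod_sub_self a q
      have db := pv_mod_sub_self b q
      have he : PySem.Int.mod a q - PySem.Int.mod b q
          = (PySem.Int.mod a q - a) - (PySem.Int.mod b q - b) + (a - b) := by ring
      rw [he]
      exact dvd_add (dvd_sub da db) h
    have habs : |PySem.Int.mod a q - PySem.Int.mod b q| < |q| := by
      rcases lt_or_gt_of_ne hq with hneg | hpos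
      · obtain ⟨a1, a2⟩ := PySem.Int.mod_neg_bounds a hneg
        obtain ⟨b1, b2⟩ := PySem.Int.mod_neg_bounds b hneg
        rw [abs_lt]
        rcases abs_cases q with ⟨h1, h2⟩ | ⟨h1, h2⟩ <;> constructor <;> omega
      · have a1 := PySem.Int.mod_nonneg a hpos
        have a2 := PySem.Int.mod_lt a hpos
        have b1 := PySem.Int.mod_nonneg b hpos
        have b2 := PySem.Int.mod_lt b hpos
        rw [abs_lt]
        rcases abs_cases q with ⟨h1, h2⟩ | ⟨h1, h2⟩ <;> constructor <;> omega
    have := Int.eq_zero_of_abs_lt_dvd ((abs_dvd _ _).mpr hdvd) habs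
    linarith

-- reducing each power mod q before summing does not change the final mod
lemma pv_dvd_sum_sub (l : List Nat) (d p : Nat → Int) (q : Int) :
    q ∣ ((l.map (fun k => d k * PySem.Int.mod (p k) q)).sum
          - (l.map (fun k => d k * p k)).sum) := by
  induction l with
  | nil => simp
  | cons a t ih =>
    simp only [List.map_cons, List.sum_cons]
    have he : (d a * PySem.Int.mod (p a) q + (t.map (fun k => d k * PySem.Int.mod (p k) q)).sum)
        - (d a * p a + (t.map (fun k => d k * p k)).sum)
        = d a * (PySem.Int.mod (p a) q - p a)
          + ((t.map (fun k => d k * PySem.Int.mod (p k) q)).sum - (t.map (fun k => d k * p k)).sum) := by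
      ring
    rw [he]
    exact dvd_add (Dvd.dvd.mul_left (pv_mod_sub_self (p a) q) (d a)) ih

-- the B-side branch test is the negation of pyWildcard
lemma pv_notWild (c : Char) : (65 ≤ c.toNat ∧ c.toNat ≤ 90) ↔ pyWildcard c = false := by
  simp [pyWildcard]

-- ===== VERDICT (by name: the statement is the Claim_ definition above) =====
theorem new_horner_spec : Claim_equal_new_horner := by
  intro st x q _ hpre
  obtain ⟨hne, -, -⟩ := hpre
  have hlen : 1 ≤ st.toList.length := by
    cases h : st.toList with
    | nil => exact absurd h hne
    | cons a t => simp
  show new_horner st x q = new_horner_alt st x q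
  simp only [new_horner, new_horner_alt]
  -- A side: the loop computes (pvH, pvP)
  rw [pv_loopA st.toList x st.toList.length hlen le_rfl]
  -- B side: rewrite enumerate to range form
  rw [pv_enum_eq st.toList 0]
  simp only [List.foldl_map]
  rw [Prod.mk.injEq]
  refine ⟨?_, ?_⟩
  · -- result component
    have hB : (List.range st.toList.length).foldl
        (fun (r : Int) (k : Nat) =>
          if 65 ≤ (st.toList.getD k 'A').toNat ∧ (st.toList.getD k 'A').toNat ≤ 90 then
            r + (((st.toList.getD k 'A').toNat : Int) - 65)
                * PySem.Int.powMod x (st.toList.length - 1 - ((0 : Int) + (k : Int)).toNat) q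
          else r) 0
        = ((List.range st.toList.length).map
            (fun k => pvDig (st.toList.getD k 'A')
              * PySem.Int.mod (x ^ (st.toList.length - 1 - k)) q)).sum := by
      rw [PySem.List.foldl_congr_mem _ _
            (fun (r : Int) (k : Nat) => r + pvDig (st.toList.getD k 'A')
              * PySem.Int.mod (x ^ (st.toList.length - 1 - k)) q) 0 ?_]
      · rw [PySem.List.foldl_add]
        simp
      · intro r k _
        simp only [zero_add, Int.toNat_natCast, pvDig, PySem.Int.powMod_eq]
        by_cases hw : pyWildcard (st.toList.getD k 'A')
        · simp [pv_notWild, hw, -List.getD_eq_getElem?_getD]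
        · simp [pv_notWild, hw, -List.getD_eq_getElem?_getD]
    rw [hB, pv_H_eq_sum]
    exact (pv_mod_congr _ _ q
      (pv_dvd_sum_sub (List.range st.toList.length)
        (fun k => pvDig (st.toList.getD k 'A'))
        (fun k => x ^ (st.toList.length - 1 - k)) q)).symm
  · -- po component
    have hpo :
        (List.range st.toList.length).foldl
          (fun (p : Option Int) (k : Nat) =>
            if 65 ≤ (st.toList.getD k 'A').toNat ∧ (st.toList.getD k 'A').toNat ≤ 90 then p
            else some ((0 : Int) + (k : Int))) none
        = pvP st.toList st.toList.length := by
      rw [← pv_poB]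
      apply PySem.List.foldl_congr_mem
      intro p k _
      by_cases hw : pyWildcard (st.toList.getD k 'A')
      · simp [pv_notWild, hw, -List.getD_eq_getElem?_getD]
      · simp [pv_notWild, hw, -List.getD_eq_getElem?_getD]
    rw [hpo]
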